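-- pv_equiv track=rewrite | github.com/mcorsano/Exam_Project_IR | Wilcard.py | get_bigrams
-- ===== SOURCE A (Python) =====
-- def get_bigrams(term) :
--     bigrams = []
--     word = '$' + term + '$'
--     word = [c for c in word]
--     for i in range(len(word) - 1) :
--         bi = word[i:i+2]
--         if ( '*' not in bi) :
--             bigrams.append(''.join([str(letter) for letter in bi]))
--     return bigrams
-- ===== SOURCE B (Python) =====
-- def get_bigrams(term):
--     word = '$' + term + '$'
--     bigrams = []
--     for seg in word.split('*'):
--         for i in range(len(seg) - 1):
--             bigrams.append(seg[i:i+2])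
--     return bigrams
-- ===== Notes on version B (the rewrite author's own statement) =====
-- stated objective: simpler
-- what changed: Instead of scanning every index of the padded word and testing each 2-char window for the wildcard, B splits the word on the wildcard character and emits the adjacent character pairs of each wildcard-free segment.
import Mathlib
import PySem

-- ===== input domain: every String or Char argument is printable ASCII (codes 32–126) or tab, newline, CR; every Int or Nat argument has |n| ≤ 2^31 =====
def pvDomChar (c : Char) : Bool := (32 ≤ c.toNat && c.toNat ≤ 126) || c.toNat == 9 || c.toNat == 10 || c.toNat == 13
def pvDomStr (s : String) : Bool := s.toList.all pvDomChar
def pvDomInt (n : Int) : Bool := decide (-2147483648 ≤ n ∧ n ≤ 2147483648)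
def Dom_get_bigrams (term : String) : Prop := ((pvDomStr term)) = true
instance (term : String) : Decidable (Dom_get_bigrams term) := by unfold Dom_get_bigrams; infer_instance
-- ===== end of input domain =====

-- B splits the word on '*' and pairs adjacent chars per segment, instead of A's filtered sliding window; same result, proved equal.

-- ===== PORT A =====
def get_bigrams (term : String) : List String :=
  let word : List Char := '$' :: term.toList ++ ['$']   -- word = '$' + term + '$', then [c for c in word]
  (PySem.List.pyRange 0 ((word.length : Int) - 1) 1).foldl
    (fun bigrams i =>
      let bi := PySem.List.slice word (some i) (some (i + 2))
      if '*' ∉ bi then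
        bigrams ++ [String.ofList (PySem.Chars.join [] (bi.map (fun letter => [letter])))]
      else bigrams)
    []

-- ===== PORT B =====
-- exact port of str.split with a one-char separator (Source B: word.split('*'))
def splitStar : List Char → List (List Char)
  | [] => [[]]
  | c :: r => if c = '*' then [] :: splitStar r else (splitStar r).modifyHead (c :: ·)

def get_bigrams_alt (term : String) : List String :=
  let word : List Char := '$' :: term.toList ++ ['$']
  (splitStar word).foldl
    (fun bigrams seg =>
      (PySem.List.pyRange 0 ((seg.length : Int) - 1) 1).foldl
        (fun bg i => bg ++ [String.ofList (PySem.List.slice seg (some i) (some (i + 2)))])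
        bigrams)
    []

-- ===== PRECONDITION & SPEC =====
def Spec_get_bigrams (term : String) (out : List String) : Prop := out = get_bigrams_alt term
instance (term : String) (out : List String) : Decidable (Spec_get_bigrams term out) := by unfold Spec_get_bigrams; infer_instance

-- ===== CLAIM (what is proved, stated in full; the proofs are below) =====
def Claim_equal_get_bigrams : Prop := ∀ (term : String), Dom_get_bigrams term → Spec_get_bigrams term (get_bigrams term)

-- ===== LEMMAS AND PROOFS =====

-- all adjacent pairs of a list
def adjA : List Char → List String
  | a :: b :: r => String.ofList [a, b] :: adjA (b :: r)
  | _ => []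

-- adjacent pairs not containing '*'
def adjF : List Char → List String
  | a :: b :: r => if a = '*' ∨ b = '*' then adjF (b :: r) else String.ofList [a, b] :: adjF (b :: r)
  | _ => []

theorem adjF_star (r : List Char) : adjF ('*' :: r) = adjF r := by
  cases r with
  | nil => rfl
  | cons b r' => simp [adjF]

theorem splitStar_ne_nil (w : List Char) : splitStar w ≠ [] := by
  induction w with
  | nil => simp [splitStar]
  | cons c r ih =>
    simp only [splitStar]
    split
    · simp
    · cases h : splitStar r with
      | nil => exact absurd h ih
      | cons s rest => simp

theorem aux_A : ∀ (w : List Char) (acc : List String),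
    (List.range (w.length - 1)).foldl
      (fun bg k => if '*' ∉ (w.drop k).take 2 then bg ++ [String.ofList ((w.drop k).take 2)] else bg)
      acc
    = acc ++ adjF w := by
  intro w
  induction w with
  | nil => intro acc; simp [adjF]
  | cons a t ih =>
    intro acc
    cases t with
    | nil => simp [adjF]
    | cons b r =>
      have hlen : (a :: b :: r).length - 1 = ((b :: r).length - 1) + 1 := by simp
      rw [hlen, List.range_succ_eq_map, List.foldl_cons, List.foldl_map]
      have hstep : ∀ (bg : List String) (k : Nat),
          (if '*' ∉ ((a :: b :: r).drop k.succ).take 2 then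
             bg ++ [String.ofList (((a :: b :: r).drop k.succ).take 2)] else bg)
          = (if '*' ∉ ((b :: r).drop k).take 2 then
             bg ++ [String.ofList (((b :: r).drop k).take 2)] else bg) := by
        intro bg k; rfl
      simp only [hstep]
      rw [ih]
      simp only [List.drop_zero]
      by_cases h : a = '*' ∨ b = '*'
      · have hni : ¬ ('*' ∉ ((a :: b :: r).take 2)) := by
          simp only [not_not]
          rcases h with h | h
          · simp [h]
          · simp [h]
        rw [if_neg hni]
        simp [adjF, h]
      · have hpos : '*' ∉ ((a :: b :: r).take 2) := by
          have h1 : a ≠ '*' := by tauto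
          have h2 : b ≠ '*' := by tauto
          simp [Ne.symm h1, Ne.symm h2]
        rw [if_pos hpos]
        simp [adjF, h]

theorem aux_B : ∀ (w : List Char) (acc : List String),
    (List.range (w.length - 1)).foldl
      (fun bg k => bg ++ [String.ofList ((w.drop k).take 2)]) acc
    = acc ++ adjA w := by
  intro w
  induction w with
  | nil => intro acc; simp [adjA]
  | cons a t ih =>
    intro acc
    cases t with
    | nil => simp [adjA]
    | cons b r =>
      have hlen : (a :: b :: r).length - 1 = ((b :: r).length - 1) + 1 := by simp
      rw [hlen, List.range_succ_eq_map, List.foldl_cons, List.foldl_map]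
      have hstep : ∀ (bg : List String) (k : Nat),
          bg ++ [String.ofList (((a :: b :: r).drop k.succ).take 2)]
          = bg ++ [String.ofList (((b :: r).drop k).take 2)] := by
        intro bg k; rfl
      simp only [hstep]
      rw [ih]
      simp [adjA]

-- the range/slice form of each loop reduces to the List.range/drop/take form
theorem loop_A_eq (w : List Char) :
    (PySem.List.pyRange 0 ((w.length : Int) - 1) 1).foldl
      (fun bigrams i =>
        let bi := PySem.List.slice w (some i) (some (i + 2))
        if '*' ∉ bi then
          bigrams ++ [String.ofList (PySem.Chars.join [] (bi.map (fun letter => [letter])))]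
        else bigrams)
      []
    = adjF w := by
  rw [PySem.List.pyRange_one]
  have hT : (((w.length : Int) - 1) - 0).toNat = w.length - 1 := by omega
  rw [hT, List.foldl_map]
  have hstep : ∀ (bg : List String) (k : Nat),
      (fun (bigrams : List String) (i : Int) =>
        let bi := PySem.List.slice w (some i) (some (i + 2))
        if '*' ∉ bi then
          bigrams ++ [String.ofList (PySem.Chars.join [] (bi.map (fun letter => [letter])))]
        else bigrams) bg ((0 : Int) + (k : Int))
      = (if '*' ∉ (w.drop k).take 2 then bg ++ [String.ofList ((w.drop k).take 2)] else bg) := by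
    intro bg k
    have hsl : PySem.List.slice w (some ((0 : Int) + (k : Int))) (some ((0 : Int) + (k : Int) + 2))
        = (w.drop k).take 2 := by
      have : (0 : Int) + (k : Int) + 2 = ((k + 2 : Nat) : Int) := by push_cast; ring
      rw [this]
      have h0 : (0 : Int) + (k : Int) = ((k : Nat) : Int) := by ring
      rw [h0, PySem.List.slice_natCast]
      have h2 : k + 2 - k = 2 := by omega
      rw [h2]
    simp only [hsl, PySem.Chars.join_nil_singletons]
  simp only [hstep]
  exact (aux_A w []).trans (by simp)

theorem inner_B_eq (seg : List Char) (acc : List String) :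
    (PySem.List.pyRange 0 ((seg.length : Int) - 1) 1).foldl
      (fun bg i => bg ++ [String.ofList (PySem.List.slice seg (some i) (some (i + 2)))]) acc
    = acc ++ adjA seg := by
  rw [PySem.List.pyRange_one]
  have hT : (((seg.length : Int) - 1) - 0).toNat = seg.length - 1 := by omega
  rw [hT, List.foldl_map]
  have hstep : ∀ (bg : List String) (k : Nat),
      bg ++ [String.ofList (PySem.List.slice seg (some ((0 : Int) + (k : Int))) (some ((0 : Int) + (k : Int) + 2)))]
      = bg ++ [String.ofList ((seg.drop k).take 2)] := by
    intro bg k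
    have : (0 : Int) + (k : Int) + 2 = ((k + 2 : Nat) : Int) := by push_cast; ring
    rw [this]
    have h0 : (0 : Int) + (k : Int) = ((k : Nat) : Int) := by ring
    rw [h0, PySem.List.slice_natCast]
    have h2 : k + 2 - k = 2 := by omega
    rw [h2]
  simp only [hstep]
  exact aux_B seg acc

-- the key algorithmic fact: the '*'-filtered sliding window equals per-segment pairs
theorem adjF_eq_flatMap : ∀ (n : Nat) (w : List Char), w.length ≤ n →
    adjF w = (splitStar w).flatMap adjA := by
  intro n
  induction n with
  | zero =>
    intro w hw
    have : w = [] := by cases w <;> simp_all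
    subst this; rfl
  | succ n ih =>
    intro w hw
    cases w with
    | nil => rfl
    | cons c r =>
      by_cases hc : c = '*'
      · subst hc
        rw [adjF_star]
        simp only [splitStar]
        rw [ih r (by simpa using Nat.lt_succ_iff.mp (by simpa using hw))]
        simp [adjA]
      · cases r with
        | nil =>
          simp [splitStar, hc, adjF, adjA]
        | cons b r' =>
          by_cases hb : b = '*'
          · subst hb
            have h1 : adjF (c :: '*' :: r') = adjF r' := by
              rw [show adjF (c :: '*' :: r') = adjF ('*' :: r') from by simp [adjF], adjF_star]
            rw [h1]
            simp only [splitStar, if_neg hc, List.modifyHead]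
            rw [ih r' (by simp at hw ⊢; omega)]
            simp [adjA]
          · have hr : adjF (b :: r') = (splitStar (b :: r')).flatMap adjA :=
              ih (b :: r') (by simpa using Nat.lt_succ_iff.mp (by simpa using hw))
            obtain ⟨s, rest, hs⟩ : ∃ s rest, splitStar (b :: r') = s :: rest := by
              cases h : splitStar (b :: r') with
              | nil => exact absurd h (splitStar_ne_nil _)
              | cons s rest => exact ⟨s, rest, rfl⟩
            have hshape : ∃ s', s = b :: s' := by
              have := hs
              simp only [splitStar, if_neg hb] at this
              cases h2 : splitStar r' with
              | nil => exact absurd h2 (splitStar_ne_nil _)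
              | cons x xs =>
                rw [h2] at this
                simp only [List.modifyHead] at this
                exact ⟨x, by injection this with h _; exact h.symm⟩
            obtain ⟨s', rfl⟩ := hshape
            have hsplit : splitStar (c :: b :: r') = (c :: b :: s') :: rest := by
              show (if c = '*' then [] :: splitStar (b :: r')
                    else (splitStar (b :: r')).modifyHead (c :: ·)) = (c :: b :: s') :: rest
              rw [if_neg hc, hs]
              rfl
            rw [hsplit]
            simp only [List.flatMap_cons]
            have hA : adjF (c :: b :: r') = String.ofList [c, b] :: adjF (b :: r') := by
              simp [adjF, hc, hb]
            rw [hA, hr, hs]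
            simp [adjA]

-- ===== VERDICT (by name: the statement is the Claim_ definition above) =====
theorem get_bigrams_spec : Claim_equal_get_bigrams := by
  intro term _
  unfold Spec_get_bigrams get_bigrams get_bigrams_alt
  simp only []
  rw [loop_A_eq]
  rw [adjF_eq_flatMap ('$' :: term.toList ++ ['$']).length _ le_rfl]
  have hfun : (fun (bigrams : List String) (seg : List Char) =>
      (PySem.List.pyRange 0 ((seg.length : Int) - 1) 1).foldl
        (fun bg i => bg ++ [String.ofList (PySem.List.slice seg (some i) (some (i + 2)))]) bigrams)
      = fun acc seg => acc ++ adjA seg := by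
    funext acc seg
    exact inner_B_eq seg acc
  rw [hfun, PySem.List.foldl_append_eq_flatMap]
  simp
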